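-- pv_equiv track=rewrite | github.com/OsProgramadores/op-desafios | desafio-03/alexandrempierre/python/main.py | coeff_bounds
-- ===== SOURCE A (Python) =====
-- from typing import Set, Tuple, Iterable
--
-- def coeff_bounds(basis:Tuple[int], lower_bound:int, upper_bound:int) -> range:
--     '''Calculates bounds to the coefficients of the combinations to cut the
-- number of computations a little'''
--     start = 2
--     while lower_bound > basis[0] * start:
--         start += 1
--     stop = 9
--     while upper_bound < basis[0] * stop:
--         stop -= 1
--     return range(start - 1, stop + 1)
-- ===== SOURCE B (Python) =====
-- def coeff_bounds(basis, lower_bound, upper_bound):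
--     '''Calculates bounds to the coefficients of the combinations to cut the
-- number of computations a little'''
--     b = basis[0]
--     start = max(2, -((-lower_bound) // b))   # ceil(lower_bound / b)
--     stop = min(9, upper_bound // b)          # floor(upper_bound / b)
--     return range(start - 1, stop + 1)
-- ===== Notes on version B (the rewrite author's own statement) =====
-- stated objective: alternative
-- what changed: Replaces A's two counting while-loops with closed-form ceiling/floor divisions: start = max(2, ceil(lower_bound/basis[0])), stop = min(9, floor(upper_bound/basis[0])). Pre_ excludes empty basis (A raises IndexError) and non-positive basis[0], outside the task's natural domain: there A diverges on most inputs and on the rest returns its initial range(1,10) untouched, while B divides by basis[0].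
-- outside the precondition, e.g. on coeff_bounds((0,), 0, 0): A returns [1, 2, 3, 4, 5, 6, 7, 8, 9], B raises ZeroDivisionError; on coeff_bounds((-1,), -5, 0): A returns [1, 2, 3, 4, 5, 6, 7, 8, 9], B returns []
import Mathlib
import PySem

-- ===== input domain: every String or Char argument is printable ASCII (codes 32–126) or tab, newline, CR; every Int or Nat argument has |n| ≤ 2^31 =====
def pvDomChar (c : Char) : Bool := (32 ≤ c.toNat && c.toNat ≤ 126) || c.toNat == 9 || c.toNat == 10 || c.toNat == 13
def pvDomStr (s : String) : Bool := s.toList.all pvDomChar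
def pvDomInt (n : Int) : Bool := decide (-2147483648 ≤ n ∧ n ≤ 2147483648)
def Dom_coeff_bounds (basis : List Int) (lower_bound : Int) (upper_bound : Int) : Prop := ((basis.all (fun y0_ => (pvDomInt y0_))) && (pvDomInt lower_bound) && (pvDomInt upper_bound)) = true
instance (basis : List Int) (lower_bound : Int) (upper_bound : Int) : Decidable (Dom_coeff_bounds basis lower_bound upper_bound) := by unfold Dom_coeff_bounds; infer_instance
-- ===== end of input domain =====

-- B computes start/stop by closed-form ceiling/floor division instead of A's two counting while-loops.

-- ===== PORT A =====
-- 'while lower_bound > basis[0] * start: start += 1', fuel makes the loop total (it is enough under Pre_)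
def cbStartLoop (b lower_bound : Int) : Nat → Int → Int
  | 0, s => s
  | n + 1, s => if lower_bound > b * s then cbStartLoop b lower_bound n (s + 1) else s

-- 'while upper_bound < basis[0] * stop: stop -= 1'
def cbStopLoop (b upper_bound : Int) : Nat → Int → Int
  | 0, t => t
  | n + 1, t => if upper_bound < b * t then cbStopLoop b upper_bound n (t - 1) else t

def coeff_bounds (basis : List Int) (lower_bound : Int) (upper_bound : Int) : List Int :=
  match basis with
  | [] => []  -- basis[0] raises IndexError: excluded by Pre_
  | b :: _ =>
    let start := cbStartLoop b lower_bound (lower_bound.natAbs + 10) 2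
    let stop := cbStopLoop b upper_bound (upper_bound.natAbs + 10) 9
    PySem.List.pyRange (start - 1) (stop + 1) 1

-- ===== PORT B =====
def coeff_bounds_alt (basis : List Int) (lower_bound : Int) (upper_bound : Int) : List Int :=
  match basis with
  | [] => []  -- basis[0] raises IndexError: excluded by Pre_
  | b :: _ =>
    let start := max 2 (-(PySem.Int.floordiv (-lower_bound) b))
    let stop := min 9 (PySem.Int.floordiv upper_bound b)
    PySem.List.pyRange (start - 1) (stop + 1) 1

-- ===== PRECONDITION & SPEC =====
-- Pre_ restricts to the task's natural domain (a basis with positive first element): on an empty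
-- basis A raises IndexError, and with basis[0] ≤ 0 A's loops diverge on most inputs and on the
-- remaining ones return the initial range(1,10) untouched (B's division needs basis[0] > 0).
def Pre_coeff_bounds (basis : List Int) (lower_bound : Int) (upper_bound : Int) : Prop :=
  basis ≠ [] ∧ 0 < basis.headD 0
instance (basis : List Int) (lower_bound : Int) (upper_bound : Int) : Decidable (Pre_coeff_bounds basis lower_bound upper_bound) := by unfold Pre_coeff_bounds; infer_instance

def pvWitness_coeff_bounds : List Int × Int × Int := ([3, 7], 5, 40)

def Spec_coeff_bounds (basis : List Int) (lower_bound : Int) (upper_bound : Int) (out : List Int) : Prop := out = coeff_bounds_alt basis lower_bound upper_bound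
instance (basis : List Int) (lower_bound : Int) (upper_bound : Int) (out : List Int) : Decidable (Spec_coeff_bounds basis lower_bound upper_bound out) := by unfold Spec_coeff_bounds; infer_instance

-- ===== CLAIM (what is proved, stated in full; the proofs are below) =====
def Claim_equal_coeff_bounds : Prop := ∀ (basis : List Int) (lower_bound : Int) (upper_bound : Int), Dom_coeff_bounds basis lower_bound upper_bound → Pre_coeff_bounds basis lower_bound upper_bound → Spec_coeff_bounds basis lower_bound upper_bound (coeff_bounds basis lower_bound upper_bound)

-- ===== LEMMAS AND PROOFS =====

-- for 0 < b, the loop condition 'lower > b*s' says exactly 's < ceil(lower/b)'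
theorem cb_start_cond {b lower s : Int} (hb : 0 < b) :
    lower > b * s ↔ s < -(PySem.Int.floordiv (-lower) b) := by
  rw [PySem.Int.floordiv_eq_ediv_of_pos hb]
  constructor
  · intro h
    have : (-lower) / b < -s := by
      apply Int.ediv_lt_of_lt_mul hb; nlinarith
    omega
  · intro h
    by_contra hc
    push_neg at hc
    have : -s ≤ (-lower) / b := (Int.le_ediv_iff_mul_le hb).2 (by nlinarith)
    omega

theorem cbStartLoop_eq {b lower : Int} (hb : 0 < b) :
    ∀ (n : Nat) (s : Int), -(PySem.Int.floordiv (-lower) b) - s ≤ n →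
      cbStartLoop b lower n s = max s (-(PySem.Int.floordiv (-lower) b)) := by
  intro n
  induction n with
  | zero => intro s h; simp only [cbStartLoop, Nat.cast_zero] at *; omega
  | succ n ih =>
    intro s h
    rw [cbStartLoop]
    by_cases hc : lower > b * s
    · have hs : s < -(PySem.Int.floordiv (-lower) b) := (cb_start_cond hb).1 hc
      rw [if_pos hc, ih (s + 1) (by omega)]
      omega
    · have hs : ¬ s < -(PySem.Int.floordiv (-lower) b) := fun h' => hc ((cb_start_cond hb).2 h')
      rw [if_neg hc]; omega

-- for 0 < b, the loop condition 'upper < b*t' says exactly 'floor(upper/b) < t'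
theorem cb_stop_cond {b upper t : Int} (hb : 0 < b) :
    upper < b * t ↔ PySem.Int.floordiv upper b < t := by
  rw [PySem.Int.floordiv_eq_ediv_of_pos hb]
  constructor
  · intro h
    apply Int.ediv_lt_of_lt_mul hb; nlinarith
  · intro h
    have h2 := Int.lt_ediv_add_one_mul_self upper hb
    nlinarith

theorem cbStopLoop_eq {b upper : Int} (hb : 0 < b) :
    ∀ (n : Nat) (t : Int), t - PySem.Int.floordiv upper b ≤ n →
      cbStopLoop b upper n t = min t (PySem.Int.floordiv upper b) := by
  intro n
  induction n with
  | zero => intro t h; simp [cbStopLoop]; omega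
  | succ n ih =>
    intro t h
    rw [cbStopLoop]
    by_cases hc : upper < b * t
    · have ht := (cb_stop_cond hb).1 hc
      rw [if_pos hc, ih (t - 1) (by omega)]
      omega
    · have ht : ¬ PySem.Int.floordiv upper b < t := fun h' => hc ((cb_stop_cond hb).2 h')
      rw [if_neg hc]; omega

-- ceil(lower/b) ≤ max 0 lower when 0 < b (fuel sufficiency)
theorem ceil_le {b lower : Int} (hb : 0 < b) :
    -(PySem.Int.floordiv (-lower) b) ≤ max 0 lower := by
  rw [PySem.Int.floordiv_eq_ediv_of_pos hb]
  rcases le_or_gt lower 0 with h | h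
  · have : 0 ≤ (-lower) / b := Int.ediv_nonneg (by omega) (by omega)
    omega
  · have : -lower ≤ (-lower) / b := (Int.le_ediv_iff_mul_le hb).2 (by nlinarith)
    omega

-- min 0 upper ≤ floor(upper/b) when 0 < b (fuel sufficiency)
theorem floor_ge {b upper : Int} (hb : 0 < b) :
    min 0 upper ≤ PySem.Int.floordiv upper b := by
  rw [PySem.Int.floordiv_eq_ediv_of_pos hb]
  rcases le_or_gt 0 upper with h | h
  · have : 0 ≤ upper / b := Int.ediv_nonneg h (by omega)
    omega
  · have : upper ≤ upper / b := (Int.le_ediv_iff_mul_le hb).2 (by nlinarith)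
    omega

-- ===== VERDICT (by name: the statement is the Claim_ definition above) =====
theorem coeff_bounds_spec : Claim_equal_coeff_bounds := by
  intro basis lower upper _ hpre
  obtain ⟨hne, hpos⟩ := hpre
  match basis with
  | [] => exact absurd rfl hne
  | b :: rest =>
    have hb : 0 < b := by simpa using hpos
    show coeff_bounds (b :: rest) lower upper = coeff_bounds_alt (b :: rest) lower upper
    unfold coeff_bounds coeff_bounds_alt
    have h1 := cbStartLoop_eq (lower := lower) hb (lower.natAbs + 10) 2
      (by have := ceil_le (lower := lower) hb; omega)
    have h2 := cbStopLoop_eq (upper := upper) hb (upper.natAbs + 10) 9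
      (by have := floor_ge (upper := upper) hb; omega)
    simp only [h1, h2]
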